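-- pv_equiv track=rewrite | github.com/igloo81/nonogram | determineTable.py | distributeDigitsOverLeftAndTop
-- ===== SOURCE A (Python) =====
-- def distributeDigitsOverLeftAndTop(digitsInGrid):
--     lefties = []
--     toppies = []
--
--     sumLeftMinusTop = 0
--     while (len(digitsInGrid) > 0):
--         if (sumLeftMinusTop < 0):
--             candidateIndex = sorted([index for index in range(0, len(digitsInGrid))], key=lambda index: digitsInGrid[index][0][0])[0]
--             candidate = digitsInGrid[candidateIndex]
--             sumLeftMinusTop += candidate[1]
--             lefties.append(candidate)
--             digitsInGrid.pop(candidateIndex)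
--         else:
--             candidateIndex = sorted([index for index in range(0, len(digitsInGrid))], key=lambda index: digitsInGrid[index][0][1])[0]
--             candidate = digitsInGrid[candidateIndex]
--             sumLeftMinusTop -= candidate[1]
--             toppies.append(candidate)
--             digitsInGrid.pop(candidateIndex)
--     return (lefties, toppies, sumLeftMinusTop)
-- ===== SOURCE B (Python) =====
-- def distributeDigitsOverLeftAndTop(digitsInGrid):
--     # One-time presort by (coordinate, original index) for each axis, then a
--     # single pass with advancing pointers and a removed-set, instead of A's
--     # re-sort of the whole remaining list at every iteration.
--     # Like A, this empties digitsInGrid in place.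
--     items = list(enumerate(digitsInGrid))
--     byX = sorted(items, key=lambda e: (e[1][0][0], e[0]))
--     byY = sorted(items, key=lambda e: (e[1][0][1], e[0]))
--     removed = set()
--     lefties = []
--     toppies = []
--     sumLeftMinusTop = 0
--     ix = 0
--     iy = 0
--     for _ in range(len(items)):
--         if sumLeftMinusTop < 0:
--             while byX[ix][0] in removed:
--                 ix += 1
--             index, digit = byX[ix]
--             ix += 1
--             lefties.append(digit)
--             sumLeftMinusTop += digit[1]
--         else:
--             while byY[iy][0] in removed:
--                 iy += 1
--             index, digit = byY[iy]
--             iy += 1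
--             toppies.append(digit)
--             sumLeftMinusTop -= digit[1]
--         removed.add(index)
--     del digitsInGrid[:]
--     return (lefties, toppies, sumLeftMinusTop)
-- ===== Notes on version B (the rewrite author's own statement) =====
-- stated objective: faster
-- what changed: A re-sorts the index list of the whole remaining list at every iteration to find the minimum; B sorts the enumerated list once per axis by (coordinate, original index) and then runs a single pass with two advancing pointers and a removed-set, popping the next live element from the relevant presorted list.
import Mathlib
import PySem

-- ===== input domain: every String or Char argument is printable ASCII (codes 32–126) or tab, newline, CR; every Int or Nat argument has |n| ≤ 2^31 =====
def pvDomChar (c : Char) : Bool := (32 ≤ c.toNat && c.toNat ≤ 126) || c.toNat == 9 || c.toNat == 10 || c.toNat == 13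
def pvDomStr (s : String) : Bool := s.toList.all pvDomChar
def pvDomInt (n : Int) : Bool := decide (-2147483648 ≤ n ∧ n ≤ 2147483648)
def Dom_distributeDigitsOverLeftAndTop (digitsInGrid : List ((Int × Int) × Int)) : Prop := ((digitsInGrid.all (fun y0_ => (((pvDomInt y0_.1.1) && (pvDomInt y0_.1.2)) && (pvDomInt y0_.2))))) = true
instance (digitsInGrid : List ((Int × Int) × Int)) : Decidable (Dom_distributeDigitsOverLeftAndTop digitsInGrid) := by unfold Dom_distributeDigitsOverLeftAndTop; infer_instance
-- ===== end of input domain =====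

-- B presorts the enumerated digits once per axis by (coordinate, original index) and runs one pass
-- with a removed-set, instead of A's per-iteration re-sort of the remaining list (objective: faster).
-- Both Pythons empty the argument list in place; the equivalence proved here is about the return value.

-- ===== PORT A =====
def pvDigD : (Int × Int) × Int := ((0, 0), 0)

def pvALoop : Nat → List ((Int × Int) × Int) → List ((Int × Int) × Int) →
    List ((Int × Int) × Int) → Int →
    (List ((Int × Int) × Int)) × (List ((Int × Int) × Int)) × Int
  | 0, _, lef, top, s => (lef, top, s)   -- fuel guard only; fuel = initial length suffices
  | fuel + 1, dig, lef, top, s =>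
    if 0 < dig.length then
      if s < 0 then
        let idxs := PySem.List.sorted (PySem.List.pyRange 0 dig.length 1)
          (fun index => (PySem.List.pyGetD dig index pvDigD).1.1)
        let ci := PySem.List.pyGetD idxs 0 0
        let c := PySem.List.pyGetD dig ci pvDigD
        match PySem.List.pop? dig ci with
        | some pr => pvALoop fuel pr.2 (lef ++ [c]) top (s + c.2)
        | none => (lef ++ [c], top, s + c.2)   -- unreachable: ci is in range
      else
        let idxs := PySem.List.sorted (PySem.List.pyRange 0 dig.length 1)
          (fun index => (PySem.List.pyGetD dig index pvDigD).1.2)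
        let ci := PySem.List.pyGetD idxs 0 0
        let c := PySem.List.pyGetD dig ci pvDigD
        match PySem.List.pop? dig ci with
        | some pr => pvALoop fuel pr.2 lef (top ++ [c]) (s - c.2)
        | none => (lef, top ++ [c], s - c.2)   -- unreachable: ci is in range
    else (lef, top, s)

def distributeDigitsOverLeftAndTop (digitsInGrid : List ((Int × Int) × Int)) :
    (List ((Int × Int) × Int)) × (List ((Int × Int) × Int)) × Int :=
  pvALoop digitsInGrid.length digitsInGrid [] [] 0

-- ===== PORT B =====
-- the 'while byX[ix][0] in removed: ix += 1' pointer advance, on the suffix of the presorted list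
def pvBSkip (removed : PySem.Set Int) :
    List (Int × ((Int × Int) × Int)) → List (Int × ((Int × Int) × Int))
  | [] => []
  | e :: t => if PySem.Set.contains removed e.1 then pvBSkip removed t else e :: t

def pvBLoop : Nat → List (Int × ((Int × Int) × Int)) → List (Int × ((Int × Int) × Int)) →
    PySem.Set Int → List ((Int × Int) × Int) → List ((Int × Int) × Int) → Int →
    (List ((Int × Int) × Int)) × (List ((Int × Int) × Int)) × Int
  | 0, _, _, _, lef, top, s => (lef, top, s)
  | k + 1, sx, sy, removed, lef, top, s =>
    if s < 0 then
      match pvBSkip removed sx with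
      | [] => (lef, top, s)   -- unreachable: some live element remains
      | e :: rest => pvBLoop k rest sy (PySem.Set.add removed e.1) (lef ++ [e.2]) top (s + e.2.2)
    else
      match pvBSkip removed sy with
      | [] => (lef, top, s)   -- unreachable: some live element remains
      | e :: rest => pvBLoop k sx rest (PySem.Set.add removed e.1) lef (top ++ [e.2]) (s - e.2.2)

def distributeDigitsOverLeftAndTop_alt (digitsInGrid : List ((Int × Int) × Int)) :
    (List ((Int × Int) × Int)) × (List ((Int × Int) × Int)) × Int :=
  let items := PySem.List.enumerate digitsInGrid 0
  let byX := PySem.List.sorted2 items (fun e => e.2.1.1) (fun e => e.1)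
  let byY := PySem.List.sorted2 items (fun e => e.2.1.2) (fun e => e.1)
  pvBLoop items.length byX byY PySem.Set.empty [] [] 0

-- ===== PRECONDITION & SPEC =====
def Spec_distributeDigitsOverLeftAndTop (digitsInGrid : List ((Int × Int) × Int)) (out : (List ((Int × Int) × Int)) × (List ((Int × Int) × Int)) × Int) : Prop := out = distributeDigitsOverLeftAndTop_alt digitsInGrid
instance (digitsInGrid : List ((Int × Int) × Int)) (out : (List ((Int × Int) × Int)) × (List ((Int × Int) × Int)) × Int) : Decidable (Spec_distributeDigitsOverLeftAndTop digitsInGrid out) := by unfold Spec_distributeDigitsOverLeftAndTop; infer_instance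

-- ===== CLAIM (what is proved, stated in full; the proofs are below) =====
def Claim_equal_distributeDigitsOverLeftAndTop : Prop := ∀ (digitsInGrid : List ((Int × Int) × Int)), Dom_distributeDigitsOverLeftAndTop digitsInGrid → Spec_distributeDigitsOverLeftAndTop digitsInGrid (distributeDigitsOverLeftAndTop digitsInGrid)

-- ===== LEMMAS AND PROOFS =====

-- the reference greedy step: first element with minimal key, and the list with it removed
def pvPick (g : ((Int × Int) × Int) → Int) (v : (Int × Int) × Int) :
    List ((Int × Int) × Int) → ((Int × Int) × Int) × List ((Int × Int) × Int)
  | [] => (v, [])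
  | w :: t =>
    let pr := pvPick g w t
    if g pr.1 < g v then (pr.1, v :: pr.2) else (v, w :: t)

def pvGX (v : (Int × Int) × Int) : Int := v.1.1
def pvGY (v : (Int × Int) × Int) : Int := v.1.2

-- the reference greedy loop both ports are reduced to
def pvSpecLoop : Nat → List ((Int × Int) × Int) → List ((Int × Int) × Int) →
    List ((Int × Int) × Int) → Int → (List ((Int × Int) × Int)) × (List ((Int × Int) × Int)) × Int
  | 0, _, lef, top, s => (lef, top, s)
  | _ + 1, [], lef, top, s => (lef, top, s)
  | k + 1, v :: t, lef, top, s =>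
    if s < 0 then
      let pr := pvPick pvGX v t
      pvSpecLoop k pr.2 (lef ++ [pr.1]) top (s + pr.1.2)
    else
      let pr := pvPick pvGY v t
      pvSpecLoop k pr.2 lef (top ++ [pr.1]) (s - pr.1.2)

-- "m is the element of l at the earliest position p attaining the minimal key g"
def pvIsFM (g : ((Int × Int) × Int) → Int) (l : List ((Int × Int) × Int))
    (m : (Int × Int) × Int) (p : Nat) : Prop :=
  p < l.length ∧ l.getD p pvDigD = m ∧ (∀ q, q < p → g m < g (l.getD q pvDigD)) ∧
    (∀ q, q < l.length → g m ≤ g (l.getD q pvDigD))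

theorem pvPick_isFM (g : ((Int × Int) × Int) → Int) (t : List ((Int × Int) × Int))
    (v : (Int × Int) × Int) :
    ∃ p, pvIsFM g (v :: t) (pvPick g v t).1 p ∧ (pvPick g v t).2 = (v :: t).eraseIdx p := by
  induction t generalizing v with
  | nil =>
    refine ⟨0, ⟨by simp, by simp [pvPick], by omega, ?_⟩, by simp [pvPick]⟩
    intro q hq
    match q with
    | 0 => simp [pvPick]
  | cons w t' ih =>
    obtain ⟨p', ⟨hp', hval, hstrict, hmin⟩, herase⟩ := ih w
    by_cases hlt : g (pvPick g w t').1 < g v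
    · refine ⟨p' + 1, ⟨by simpa using hp', ?_, ?_, ?_⟩, ?_⟩
      · simpa [pvPick, hlt] using hval
      · intro q hq
        match q with
        | 0 => simpa [pvPick, hlt] using hlt
        | q + 1 => simpa [pvPick, hlt] using hstrict q (by omega)
      · intro q hq
        match q with
        | 0 => simpa [pvPick, hlt] using le_of_lt hlt
        | q + 1 => simpa [pvPick, hlt] using hmin q (by simpa using hq)
      · simp [pvPick, hlt, herase]
    · refine ⟨0, ⟨by simp, by simp [pvPick, hlt], by omega, ?_⟩, by simp [pvPick, hlt]⟩
      intro q hq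
      match q with
      | 0 => simp [pvPick, hlt]
      | q + 1 =>
        have h1 : g (pvPick g w t').1 ≤ g ((w :: t').getD q pvDigD) := hmin q (by simpa using hq)
        have h2 : g v ≤ g (pvPick g w t').1 := le_of_not_gt hlt
        simpa [pvPick, hlt] using le_trans h2 h1

theorem pvIsFM_unique (g : ((Int × Int) × Int) → Int) (l : List ((Int × Int) × Int))
    {m m' : (Int × Int) × Int} {p p' : Nat} (h : pvIsFM g l m p) (h' : pvIsFM g l m' p') :
    p = p' ∧ m = m' := by
  obtain ⟨hp, hval, hstrict, hmin⟩ := h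
  obtain ⟨hp', hval', hstrict', hmin'⟩ := h'
  rcases lt_trichotomy p p' with hlt | heq | hgt
  · exfalso
    have h1 : g m' < g (l.getD p pvDigD) := hstrict' p hlt
    have h2 : g m ≤ g (l.getD p' pvDigD) := hmin p' hp'
    rw [hval] at h1; rw [hval'] at h2; linarith
  · subst heq
    rw [← hval, ← hval']
    exact ⟨rfl, rfl⟩
  · exfalso
    have h1 : g m < g (l.getD p' pvDigD) := hstrict p' hgt
    have h2 : g m' ≤ g (l.getD p pvDigD) := hmin' p hp
    rw [hval'] at h1; rw [hval] at h2; linarith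

theorem pvPick_of_isFM (g : ((Int × Int) × Int) → Int) (t : List ((Int × Int) × Int))
    (v m : (Int × Int) × Int) (p : Nat) (h : pvIsFM g (v :: t) m p) :
    pvPick g v t = (m, (v :: t).eraseIdx p) := by
  obtain ⟨p0, h0, he⟩ := pvPick_isFM g t v
  obtain ⟨hpe, hme⟩ := pvIsFM_unique g (v :: t) h0 h
  subst hpe
  rw [← hme, ← he]

theorem pvInsertBy_nil {α : Type} (b : α → α → Bool) (x : α) :
    PySem.List.insertBy b x [] = [x] := rfl

theorem pvInsertBy_cons {α : Type} (b : α → α → Bool) (x y : α) (ys : List α) :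
    PySem.List.insertBy b x (y :: ys) =
      if b x y then x :: y :: ys else y :: PySem.List.insertBy b x ys := rfl

-- head of an insertion-sort fold, as a running minimum
theorem pvFoldlIns_head {α : Type} (b : α → α → Bool) (xs : List α) :
    ∀ (a : α) (acc : List α), ∃ tl,
      List.foldl (fun acc x => PySem.List.insertBy b x acc) (a :: acc) xs =
        (xs.foldl (fun m x => if b x m then x else m) a) :: tl := by
  induction xs with
  | nil => exact fun a acc => ⟨acc, rfl⟩
  | cons x xs ih =>
    intro a acc
    simp only [List.foldl_cons, pvInsertBy_cons]
    by_cases hb : b x a = true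
    · simp only [hb, if_true]
      exact ih x (a :: acc)
    · simp only [hb, Bool.false_eq_true, if_false]
      exact ih a (PySem.List.insertBy b x acc)

theorem pvInsertBy_sorted {α : Type} (b : α → α → Bool)
    (htrans : ∀ x y z, b x y = true → b y z = true → b x z = true)
    (hasym : ∀ x y, b x y = true → b y x = false) (x : α) :
    ∀ l : List α, l.Pairwise (fun u v => b v u = false) →
      (PySem.List.insertBy b x l).Pairwise (fun u v => b v u = false) := by
  intro l
  induction l with
  | nil => simp [pvInsertBy_nil]
  | cons y ys ihl =>
    intro hl
    rw [List.pairwise_cons] at hl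
    obtain ⟨hy, hys⟩ := hl
    rw [pvInsertBy_cons]
    by_cases hb : b x y = true
    · simp only [hb, if_true]
      refine List.Pairwise.cons ?_ (List.Pairwise.cons hy hys)
      intro z hz
      rcases List.mem_cons.mp hz with hz | hz
      · subst hz; exact hasym _ _ hb
      · by_contra hzx
        have hzx' : b z x = true := by
          cases h : b z x
          · exact absurd h hzx
          · rfl
        have : b z y = true := htrans z x y hzx' hb
        rw [hy z hz] at this; exact absurd this (by simp)
    · simp only [hb, Bool.false_eq_true, if_false]
      refine List.Pairwise.cons ?_ (ihl hys)
      intro z hz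
      rcases (PySem.List.mem_insertBy b x z ys).mp hz with hz | hz
      · subst hz
        exact (Bool.not_eq_true _).mp hb
      · exact hy z hz

-- insertion-sort fold output is pairwise ordered (needs transitivity of the strict test)
theorem pvFoldlIns_pairwise {α : Type} (b : α → α → Bool)
    (htrans : ∀ x y z, b x y = true → b y z = true → b x z = true)
    (hasym : ∀ x y, b x y = true → b y x = false) (xs : List α) :
    ∀ acc : List α, acc.Pairwise (fun u v => b v u = false) →
      (List.foldl (fun acc x => PySem.List.insertBy b x acc) acc xs).Pairwise
        (fun u v => b v u = false) := by
  induction xs with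
  | nil => exact fun acc h => h
  | cons x xs ih =>
    intro acc h
    simp only [List.foldl_cons]
    exact ih _ (pvInsertBy_sorted b htrans hasym x acc h)

-- an index-minimum fold over pyRange equals the pair fold over enumerate, projected
theorem pvFold_idx_pair (g : ((Int × Int) × Int) → Int) (dig : List ((Int × Int) × Int)) :
    ∀ (es : List (Int × ((Int × Int) × Int)))
      (_ : ∀ e ∈ es, e.2 = PySem.List.pyGetD dig e.1 pvDigD) (i0 : Int),
      es.foldl (fun m e => if g e.2 < g m.2 then e else m) (i0, PySem.List.pyGetD dig i0 pvDigD) =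
        ((es.map (·.1)).foldl
            (fun m i => if g (PySem.List.pyGetD dig i pvDigD) < g (PySem.List.pyGetD dig m pvDigD)
              then i else m) i0,
          PySem.List.pyGetD dig
            ((es.map (·.1)).foldl
              (fun m i => if g (PySem.List.pyGetD dig i pvDigD) < g (PySem.List.pyGetD dig m pvDigD)
                then i else m) i0) pvDigD) := by
  intro es
  induction es with
  | nil => intro _ i0; rfl
  | cons e es ih =>
    intro hall i0
    have he : e.2 = PySem.List.pyGetD dig e.1 pvDigD := hall e (List.mem_cons_self)
    have heta : e = (e.1, PySem.List.pyGetD dig e.1 pvDigD) := by rw [← he]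
    simp only [List.foldl_cons, List.map_cons]
    by_cases hc : g (PySem.List.pyGetD dig e.1 pvDigD) < g (PySem.List.pyGetD dig i0 pvDigD)
    · rw [if_pos (by rw [← he] at hc; exact hc), if_pos hc, heta]
      exact ih (fun x hx => hall x (List.mem_cons_of_mem e hx)) e.1
    · rw [if_neg (by rw [← he] at hc; exact hc), if_neg hc]
      exact ih (fun x hx => hall x (List.mem_cons_of_mem e hx)) i0

-- characterisation of the running-minimum pair fold over an enumerated suffix
theorem pvEfold_char (g : ((Int × Int) × Int) → Int) :
    ∀ (t : List ((Int × Int) × Int)) (sI : Int) (a : Int × ((Int × Int) × Int)),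
      (PySem.List.enumerate t sI).foldl (fun m e => if g e.2 < g m.2 then e else m) a = a ∧
          (∀ x ∈ t, ¬ g x < g a.2) ∨
        ∃ p, p < t.length ∧
          (PySem.List.enumerate t sI).foldl (fun m e => if g e.2 < g m.2 then e else m) a =
            (sI + p, t.getD p pvDigD) ∧ g (t.getD p pvDigD) < g a.2 ∧
            (∀ q, q < p → g (t.getD p pvDigD) < g (t.getD q pvDigD)) ∧
            ∀ q, q < t.length → g (t.getD p pvDigD) ≤ g (t.getD q pvDigD) := by
  intro t
  induction t with
  | nil =>
    intro sI a
    left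
    constructor
    · simp [PySem.List.enumerate_nil]
    · intro x hx; exact absurd hx (List.not_mem_nil)
  | cons w t ih =>
    intro sI a
    rw [PySem.List.enumerate_cons]
    simp only [List.foldl_cons]
    by_cases hw : g w < g a.2
    · rw [if_pos (by simpa using hw)]
      rcases ih (sI + 1) (sI, w) with ⟨heq, hnone⟩ | ⟨p, hp, heq, hlt, hstrict, hmin⟩
      · right
        refine ⟨0, by simp, ?_, by simpa using hw, by omega, ?_⟩
        · rw [heq]; simp
        · intro q hq
          match q with
          | 0 => simp
          | q + 1 =>
            have hqt : q < t.length := by simpa using hq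
            have : ¬ g (t.getD q pvDigD) < g w := by
              have hmem : t.getD q pvDigD ∈ t := by
                rw [List.getD_eq_getElem t pvDigD hqt]
                exact List.getElem_mem hqt
              simpa using hnone _ hmem
            simp only [List.getD_cons_zero, List.getD_cons_succ]
            omega
      · right
        refine ⟨p + 1, by simpa using Nat.succ_lt_succ hp, ?_, ?_, ?_, ?_⟩
        · rw [heq]
          simp only [List.getD_cons_succ]
          congr 1
          push_cast
          ring
        · simp only [List.getD_cons_succ]
          exact lt_trans hlt hw
        · intro q hq
          match q with
          | 0 => simpa using hlt
          | q + 1 =>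
            simp only [List.getD_cons_succ]
            exact hstrict q (by omega)
        · intro q hq
          match q with
          | 0 => simpa using le_of_lt hlt
          | q + 1 =>
            simp only [List.getD_cons_succ]
            exact hmin q (by simpa using hq)
    · rw [if_neg (by simpa using hw)]
      rcases ih (sI + 1) a with ⟨heq, hnone⟩ | ⟨p, hp, heq, hlt, hstrict, hmin⟩
      · left
        refine ⟨heq, ?_⟩
        intro x hx
        rcases List.mem_cons.mp hx with hx | hx
        · subst hx; exact hw
        · exact hnone x hx
      · right
        refine ⟨p + 1, by simpa using Nat.succ_lt_succ hp, ?_, ?_, ?_, ?_⟩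
        · rw [heq]
          simp only [List.getD_cons_succ]
          congr 1
          push_cast
          ring
        · simpa only [List.getD_cons_succ] using hlt
        · intro q hq
          match q with
          | 0 =>
            simp only [List.getD_cons_succ, List.getD_cons_zero]
            have : g a.2 ≤ g w := le_of_not_gt hw
            omega
          | q + 1 =>
            simp only [List.getD_cons_succ]
            exact hstrict q (by omega)
        · intro q hq
          match q with
          | 0 =>
            simp only [List.getD_cons_succ, List.getD_cons_zero]
            have : g a.2 ≤ g w := le_of_not_gt hw
            omega
          | q + 1 =>
            simp only [List.getD_cons_succ]
            exact hmin q (by simpa using hq)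

-- A's whole candidate selection, characterised through pvPick
theorem pvAstep (g : ((Int × Int) × Int) → Int) (v : (Int × Int) × Int)
    (t : List ((Int × Int) × Int)) :
    ∃ p, p < t.length + 1 ∧
      PySem.List.pyGetD
          (PySem.List.sorted (PySem.List.pyRange 0 ((v :: t).length) 1)
            (fun index => g (PySem.List.pyGetD (v :: t) index pvDigD))) 0 0 = (p : Int) ∧
        PySem.List.pyGetD (v :: t) (p : Int) pvDigD = (v :: t).getD p pvDigD ∧
        PySem.List.pop? (v :: t) (p : Int) = some ((v :: t).getD p pvDigD, (v :: t).eraseIdx p) ∧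
        pvPick g v t = ((v :: t).getD p pvDigD, (v :: t).eraseIdx p) := by
  have hall : ∀ e ∈ PySem.List.enumerate t 1, e.2 = PySem.List.pyGetD (v :: t) e.1 pvDigD := by
    intro e he
    obtain ⟨k, hk, rfl⟩ := (PySem.List.mem_enumerate_iff t 1 e).mp he
    have h1 : (1 : Int) + (k : Int) = ((k + 1 : Nat) : Int) := by push_cast; ring
    rw [h1, PySem.List.pyGetD_natCast, List.getD_cons_succ, List.getD_eq_getElem t pvDigD hk]
  have hrange : PySem.List.pyRange 0 ((v :: t).length : Int) 1 =
      0 :: (PySem.List.enumerate t 1).map (·.1) := by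
    have hb : ((v :: t).length : Int) = 1 + (t.length : Int) := by push_cast [List.length_cons]; ring
    rw [hb, PySem.List.pyRange_one_cons (by positivity), PySem.List.map_fst_enumerate]
    norm_num
  have hci : PySem.List.pyGetD
      (PySem.List.sorted (PySem.List.pyRange 0 ((v :: t).length : Int) 1)
        (fun index => g (PySem.List.pyGetD (v :: t) index pvDigD))) 0 0 =
      (((PySem.List.enumerate t 1).map (·.1)).foldl
        (fun m i => if g (PySem.List.pyGetD (v :: t) i pvDigD) <
            g (PySem.List.pyGetD (v :: t) m pvDigD) then i else m) 0 : Int) := by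
    rw [hrange, PySem.List.sorted_eq_foldl_insertBy, List.foldl_cons, pvInsertBy_nil]
    obtain ⟨tl, htl⟩ := pvFoldlIns_head
      (fun a b => decide ((fun index => g (PySem.List.pyGetD (v :: t) index pvDigD)) a <
        (fun index => g (PySem.List.pyGetD (v :: t) index pvDigD)) b))
      ((PySem.List.enumerate t 1).map (·.1)) 0 []
    rw [htl, PySem.List.pyGetD_zero_cons]
    simp only [decide_eq_true_eq]
  have hpair := pvFold_idx_pair g (v :: t) (PySem.List.enumerate t 1) hall 0
  rw [PySem.List.pyGetD_zero_cons] at hpair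
  rcases pvEfold_char g t 1 (0, v) with ⟨heq, hnone⟩ | ⟨p, hp, heq, hlt, hstrict, hmin⟩
  · -- the head v is the first minimum
    refine ⟨0, by omega, ?_, ?_, ?_, ?_⟩
    · rw [hci]
      have : (((PySem.List.enumerate t 1).map (·.1)).foldl
          (fun m i => if g (PySem.List.pyGetD (v :: t) i pvDigD) <
            g (PySem.List.pyGetD (v :: t) m pvDigD) then i else m) 0 : Int) =
          ((PySem.List.enumerate t 1).foldl (fun m e => if g e.2 < g m.2 then e else m) (0, v)).1 := by
        rw [hpair]
      rw [this, heq]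
      simp
    · rw [PySem.List.pyGetD_natCast]
    · rw [PySem.List.pop?_natCast (v :: t) 0 (by simp)]
      simp
    · have hfm : pvIsFM g (v :: t) v 0 := by
        refine ⟨by simp, by simp, by omega, ?_⟩
        intro q hq
        match q with
        | 0 => simp
        | q + 1 =>
          have hqt : q < t.length := by simpa using hq
          have hmem : t.getD q pvDigD ∈ t := by
            rw [List.getD_eq_getElem t pvDigD hqt]
            exact List.getElem_mem hqt
          have h2 : ¬ g (t.getD q pvDigD) < g v := hnone _ hmem
          simp only [List.getD_cons_succ]
          omega
      have := pvPick_of_isFM g t v v 0 hfm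
      simpa using this
  · -- the first minimum sits at position p of t, i.e. p+1 of v :: t
    refine ⟨p + 1, by omega, ?_, ?_, ?_, ?_⟩
    · rw [hci]
      have : (((PySem.List.enumerate t 1).map (·.1)).foldl
          (fun m i => if g (PySem.List.pyGetD (v :: t) i pvDigD) <
            g (PySem.List.pyGetD (v :: t) m pvDigD) then i else m) 0 : Int) =
          ((PySem.List.enumerate t 1).foldl (fun m e => if g e.2 < g m.2 then e else m) (0, v)).1 := by
        rw [hpair]
      rw [this, heq]
      push_cast; ring
    · rw [PySem.List.pyGetD_natCast]
    · rw [PySem.List.pop?_natCast (v :: t) (p + 1) (by simpa using Nat.succ_lt_succ hp)]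
      congr 1
      rw [List.getD_eq_getElem (v :: t) pvDigD (by simpa using Nat.succ_lt_succ hp)]
    · have hfm : pvIsFM g (v :: t) ((v :: t).getD (p + 1) pvDigD) (p + 1) := by
        refine ⟨by simpa using Nat.succ_lt_succ hp, rfl, ?_, ?_⟩
        · intro q hq
          match q with
          | 0 => simpa using hlt
          | q + 1 =>
            simp only [List.getD_cons_succ]
            exact hstrict q (by omega)
        · intro q hq
          match q with
          | 0 => simpa using le_of_lt hlt
          | q + 1 =>
            simp only [List.getD_cons_succ]
            exact hmin q (by simpa using hq)
      exact pvPick_of_isFM g t v _ (p + 1) hfm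

theorem pvAstepX (v : (Int × Int) × Int) (t : List ((Int × Int) × Int)) :
    ∃ p, p < t.length + 1 ∧
      PySem.List.pyGetD
          (PySem.List.sorted (PySem.List.pyRange 0 ((v :: t).length) 1)
            (fun index => (PySem.List.pyGetD (v :: t) index pvDigD).1.1)) 0 0 = (p : Int) ∧
        PySem.List.pyGetD (v :: t) (p : Int) pvDigD = (v :: t).getD p pvDigD ∧
        PySem.List.pop? (v :: t) (p : Int) = some ((v :: t).getD p pvDigD, (v :: t).eraseIdx p) ∧
        pvPick pvGX v t = ((v :: t).getD p pvDigD, (v :: t).eraseIdx p) :=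
  pvAstep pvGX v t

theorem pvAstepY (v : (Int × Int) × Int) (t : List ((Int × Int) × Int)) :
    ∃ p, p < t.length + 1 ∧
      PySem.List.pyGetD
          (PySem.List.sorted (PySem.List.pyRange 0 ((v :: t).length) 1)
            (fun index => (PySem.List.pyGetD (v :: t) index pvDigD).1.2)) 0 0 = (p : Int) ∧
        PySem.List.pyGetD (v :: t) (p : Int) pvDigD = (v :: t).getD p pvDigD ∧
        PySem.List.pop? (v :: t) (p : Int) = some ((v :: t).getD p pvDigD, (v :: t).eraseIdx p) ∧
        pvPick pvGY v t = ((v :: t).getD p pvDigD, (v :: t).eraseIdx p) :=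
  pvAstep pvGY v t

theorem pvALoop_eq_spec : ∀ (n : Nat) (dig : List ((Int × Int) × Int)), dig.length = n →
    ∀ lef top s, pvALoop n dig lef top s = pvSpecLoop n dig lef top s := by
  intro n
  induction n with
  | zero =>
    intro dig hlen lef top s
    rfl
  | succ n ih =>
    intro dig hlen lef top s
    match dig with
    | [] => simp at hlen
    | v :: t =>
      have hlent : t.length = n := by simpa using hlen
      rw [pvALoop]
      rw [if_pos (by simp)]
      by_cases hs : s < 0
      · rw [if_pos hs]
        obtain ⟨p, hp, hci, hval, hpop, hpick⟩ := pvAstepX v t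
        simp only []
        rw [hci, hval, hpop]
        rw [pvSpecLoop, if_pos hs]
        simp only [hpick]
        exact ih _ (by rw [List.length_eraseIdx_of_lt (by simpa using hp)]; omega) _ _ _
      · rw [if_neg hs]
        obtain ⟨p, hp, hci, hval, hpop, hpick⟩ := pvAstepY v t
        simp only []
        rw [hci, hval, hpop]
        rw [pvSpecLoop, if_neg hs]
        simp only [hpick]
        exact ih _ (by rw [List.length_eraseIdx_of_lt (by simpa using hp)]; omega) _ _ _

-- ===== B side =====

def pvLex (g : ((Int × Int) × Int) → Int) (u v : Int × ((Int × Int) × Int)) : Bool :=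
  decide (g u.2 < g v.2) || (!decide (g v.2 < g u.2) && decide (u.1 < v.1))

theorem pvSorted2_eq (items : List (Int × ((Int × Int) × Int)))
    (g : ((Int × Int) × Int) → Int) :
    PySem.List.sorted2 items (fun e => g e.2) (fun e => e.1) =
      List.foldl (fun acc x => PySem.List.insertBy (pvLex g) x acc) [] items := rfl

theorem pvLex_trans (g : ((Int × Int) × Int) → Int) :
    ∀ x y z, pvLex g x y = true → pvLex g y z = true → pvLex g x z = true := by
  intro x y z hxy hyz
  simp only [pvLex, Bool.or_eq_true, Bool.and_eq_true, Bool.not_eq_eq_eq_not, Bool.not_true,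
    decide_eq_true_eq, decide_eq_false_iff_not] at *
  omega

theorem pvLex_asym (g : ((Int × Int) × Int) → Int) :
    ∀ x y, pvLex g x y = true → pvLex g y x = false := by
  intro x y hxy
  cases h : pvLex g y x with
  | false => rfl
  | true =>
    exfalso
    simp only [pvLex, Bool.or_eq_true, Bool.and_eq_true, Bool.not_eq_eq_eq_not, Bool.not_true,
      decide_eq_true_eq, decide_eq_false_iff_not] at hxy h
    omega

theorem pvBSkip_cons (removed : PySem.Set Int) (e : Int × ((Int × Int) × Int))
    (t : List (Int × ((Int × Int) × Int))) :
    pvBSkip removed (e :: t) =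
      if PySem.Set.contains removed e.1 then pvBSkip removed t else e :: t := rfl

-- pvBSkip versus filter: the skip lands on the head of the filtered list
theorem pvSkip_filter (removed : PySem.Set Int) :
    ∀ l : List (Int × ((Int × Int) × Int)),
      (pvBSkip removed l = [] ∧
        l.filter (fun e => !PySem.Set.contains removed e.1) = []) ∨
      ∃ pre m rest, pvBSkip removed l = m :: rest ∧ l = pre ++ m :: rest ∧
        l.filter (fun e => !PySem.Set.contains removed e.1) =
          m :: rest.filter (fun e => !PySem.Set.contains removed e.1) := by
  intro l
  induction l with
  | nil => exact Or.inl ⟨rfl, rfl⟩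
  | cons e t ih =>
    by_cases hc : PySem.Set.contains removed e.1 = true
    · have hskip : pvBSkip removed (e :: t) = pvBSkip removed t := by
        rw [pvBSkip_cons, if_pos hc]
      have hcm : e.1 ∈ removed := by simpa using hc
      have hfil : (e :: t).filter (fun e => !PySem.Set.contains removed e.1) =
          t.filter (fun e => !PySem.Set.contains removed e.1) := by
        simp [hcm]
      rcases ih with ⟨h1, h2⟩ | ⟨pre, m, rest, h1, h2, h3⟩
      · exact Or.inl ⟨by rw [hskip, h1], by rw [hfil, h2]⟩
      · exact Or.inr ⟨e :: pre, m, rest, by rw [hskip, h1], by rw [List.cons_append, ← h2],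
          by rw [hfil, h3]⟩
    · have hcm : e.1 ∉ removed := by simpa using hc
      refine Or.inr ⟨[], e, t, by rw [pvBSkip_cons, if_neg hc], by simp, ?_⟩
      simp [hcm]

theorem pvContains_add (removed : PySem.Set Int) (i x : Int) :
    PySem.Set.contains (PySem.Set.add removed i) x =
      (PySem.Set.contains removed x || x == i) := by
  simp only [PySem.Set.add, PySem.Set.contains]
  split_ifs with h
  · cases hx : (x == i)
    · simp
    · have : x = i := by simpa using hx
      subst this
      simp only [Bool.or_true]
      simpa using h
  · simp [Bool.beq_eq_decide_eq]

-- the active presorted list after consuming its live head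
theorem pvBStep (g : ((Int × Int) × Int) → Int) (r sxl : List (Int × ((Int × Int) × Int)))
    (removed : PySem.Set Int)
    (hperm : (sxl.filter (fun e => !PySem.Set.contains removed e.1)).Perm r)
    (hsort : sxl.Pairwise (fun u v => pvLex g v u = false))
    (hnd : sxl.Pairwise (fun u v => u.1 ≠ v.1))
    (hr : r.Pairwise (fun u v => u.1 < v.1)) (hne : r ≠ []) :
    ∃ m rest r1 r2, pvBSkip removed sxl = m :: rest ∧ r = r1 ++ m :: r2 ∧
      (∀ v t, r.map (·.2) = v :: t → pvPick g v t = (m.2, (r1 ++ r2).map (·.2))) ∧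
      (rest.filter (fun e => !PySem.Set.contains (PySem.Set.add removed m.1) e.1)).Perm
        (r1 ++ r2) ∧
      rest.Pairwise (fun u v => pvLex g v u = false) ∧
      rest.Pairwise (fun u v => u.1 ≠ v.1) ∧
      (r1 ++ r2).length + 1 = r.length := by
  rcases pvSkip_filter removed sxl with ⟨hskip, hfil⟩ | ⟨pre, m, rest, hskip, hsplit, hfil⟩
  · exfalso
    rw [hfil] at hperm
    exact hne hperm.symm.eq_nil
  · have hperm' : (m :: rest.filter (fun e => !PySem.Set.contains removed e.1)).Perm r := by
      rw [← hfil]; exact hperm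
    have hmr : m ∈ r := hperm'.mem_iff.mp List.mem_cons_self
    obtain ⟨r1, r2, hr12⟩ := List.append_of_mem hmr
    subst hr12
    have hsub : (m :: rest).Sublist sxl := by
      rw [hsplit]; exact List.sublist_append_right _ _
    have hsortrest : rest.Pairwise (fun u v => pvLex g v u = false) :=
      (hsort.sublist hsub).sublist (List.sublist_cons_self m rest)
    have hndmrest : (m :: rest).Pairwise (fun u v => u.1 ≠ v.1) := hnd.sublist hsub
    have hndrest : rest.Pairwise (fun u v => u.1 ≠ v.1) :=
      hndmrest.sublist (List.sublist_cons_self m rest)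
    have hmne : ∀ e ∈ rest, m.1 ≠ e.1 := (List.pairwise_cons.mp hndmrest).1
    have hσ : (sxl.filter (fun e => !PySem.Set.contains removed e.1)).Pairwise
        (fun u v => pvLex g v u = false) := hsort.sublist List.filter_sublist
    rw [hfil] at hσ
    have hσm : ∀ e ∈ rest.filter (fun e => !PySem.Set.contains removed e.1),
        pvLex g e m = false := (List.pairwise_cons.mp hσ).1
    have hmemσ : ∀ y ∈ r1 ++ m :: r2, y ≠ m →
        y ∈ rest.filter (fun e => !PySem.Set.contains removed e.1) := by
      intro y hy hyne
      rcases List.mem_cons.mp (hperm'.mem_iff.mpr hy) with h | h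
      · exact absurd h hyne
      · exact h
    have hminall : ∀ y ∈ r1 ++ m :: r2, g m.2 ≤ g y.2 := by
      intro y hy
      by_cases hym : y = m
      · subst hym; exact le_refl _
      · have hlf := hσm y (hmemσ y hy hym)
        simp only [pvLex, Bool.or_eq_false_iff, Bool.and_eq_false_iff, Bool.not_eq_false',
          decide_eq_false_iff_not, decide_eq_true_eq] at hlf
        omega
    have hstrict1 : ∀ y ∈ r1, g m.2 < g y.2 := by
      intro y hy
      have hylt : y.1 < m.1 :=
        (List.pairwise_append.mp hr).2.2 y hy m List.mem_cons_self
      have hyne : y ≠ m := by intro h; rw [h] at hylt; exact lt_irrefl _ hylt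
      have hlf := hσm y (hmemσ y (List.mem_append_left _ hy) hyne)
      simp only [pvLex, Bool.or_eq_false_iff, Bool.and_eq_false_iff, Bool.not_eq_false',
        decide_eq_false_iff_not, decide_eq_true_eq] at hlf
      omega
    have hfilrest : rest.filter
          (fun e => !PySem.Set.contains (PySem.Set.add removed m.1) e.1) =
        rest.filter (fun e => !PySem.Set.contains removed e.1) := by
      apply List.filter_congr
      intro e he
      have hne' : e.1 ≠ m.1 := (hmne e he).symm
      rw [pvContains_add]
      simp [hne']
    have hpermrest : (rest.filter
          (fun e => !PySem.Set.contains (PySem.Set.add removed m.1) e.1)).Perm (r1 ++ r2) := by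
      rw [hfilrest]
      exact (hperm'.trans List.perm_middle).cons_inv
    refine ⟨m, rest, r1, r2, hskip, rfl, ?_, hpermrest, hsortrest, hndrest, by simp [List.length_append]; omega⟩
    intro v t hvt
    have hlenr1 : r1.length < (r1 ++ m :: r2).length := by simp
    have hfm : pvIsFM g (v :: t) m.2 r1.length := by
      rw [← hvt]
      refine ⟨by simpa using hlenr1, ?_, ?_, ?_⟩
      · rw [List.getD_eq_getElem _ _ (by simpa using hlenr1), List.getElem_map,
          List.getElem_append_right (le_refl r1.length)]
        simp
      · intro q hq
        have hq' : q < (r1 ++ m :: r2).length := by simp; omega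
        rw [List.getD_eq_getElem _ _ (by simpa using hq'), List.getElem_map,
          List.getElem_append_left hq]
        exact hstrict1 _ (List.getElem_mem hq)
      · intro q hq
        have hq' : q < (r1 ++ m :: r2).length := by simpa using hq
        rw [List.getD_eq_getElem _ _ (by simpa using hq'), List.getElem_map]
        exact hminall _ (List.getElem_mem hq')
    rw [pvPick_of_isFM g t v m.2 r1.length hfm]
    have herase : (v :: t).eraseIdx r1.length = (r1 ++ r2).map (·.2) := by
      rw [← hvt, List.map_append, List.map_cons,
        List.eraseIdx_append_of_length_le (by simp), List.map_append]
      congr 1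
      simp
    rw [herase]

-- the passive presorted list after the other axis consumed m
theorem pvBPassive (syl : List (Int × ((Int × Int) × Int))) (removed : PySem.Set Int)
    (m : Int × ((Int × Int) × Int)) (r r1 r2 : List (Int × ((Int × Int) × Int)))
    (hperm : (syl.filter (fun e => !PySem.Set.contains removed e.1)).Perm r)
    (hr : r = r1 ++ m :: r2) (hrn : r.Pairwise (fun u v => u.1 ≠ v.1)) :
    (syl.filter (fun e => !PySem.Set.contains (PySem.Set.add removed m.1) e.1)).Perm
      (r1 ++ r2) := by
  subst hr
  have hstep : syl.filter (fun e => !PySem.Set.contains (PySem.Set.add removed m.1) e.1) =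
      (syl.filter (fun e => !PySem.Set.contains removed e.1)).filter
        (fun e => !(e.1 == m.1)) := by
    rw [List.filter_filter]
    apply List.filter_congr
    intro e _
    rw [pvContains_add, Bool.not_or, Bool.and_comm]
  rw [hstep]
  have h2 := hperm.filter (fun e => !(e.1 == m.1))
  have hq : (r1 ++ m :: r2).filter (fun e => !(e.1 == m.1)) = r1 ++ r2 := by
    obtain ⟨h1, hcons, hx⟩ := List.pairwise_append.mp hrn
    have hmr2 : ∀ b ∈ r2, m.1 ≠ b.1 := (List.pairwise_cons.mp hcons).1
    rw [List.filter_append, List.filter_cons]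
    have hm : ((!(m.1 == m.1)) = false) := by simp
    rw [hm]
    simp only [Bool.false_eq_true, if_false]
    congr 1
    · apply List.filter_eq_self.mpr
      intro a ha
      have : a.1 ≠ m.1 := hx a ha m List.mem_cons_self
      simp [this]
    · apply List.filter_eq_self.mpr
      intro a ha
      have : a.1 ≠ m.1 := fun h => hmr2 a ha h.symm
      simp [this]
  rw [hq] at h2
  exact h2

theorem pvBLoop_eq_spec : ∀ (k : Nat) (r sx sy : List (Int × ((Int × Int) × Int)))
    (removed : PySem.Set Int) (lef top : List ((Int × Int) × Int)) (s : Int),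
    r.length = k → r.Pairwise (fun u v => u.1 < v.1) →
    (sx.filter (fun e => !PySem.Set.contains removed e.1)).Perm r →
    (sy.filter (fun e => !PySem.Set.contains removed e.1)).Perm r →
    sx.Pairwise (fun u v => pvLex pvGX v u = false) →
    sy.Pairwise (fun u v => pvLex pvGY v u = false) →
    sx.Pairwise (fun u v => u.1 ≠ v.1) → sy.Pairwise (fun u v => u.1 ≠ v.1) →
    pvBLoop k sx sy removed lef top s = pvSpecLoop k (r.map (·.2)) lef top s := by
  intro k
  induction k with
  | zero =>
    intro r sx sy removed lef top s _ _ _ _ _ _ _ _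
    rfl
  | succ k ih =>
    intro r sx sy removed lef top s hlen hr hpx hpy hsx hsy hnx hny
    have hne : r ≠ [] := by intro h; rw [h] at hlen; simp at hlen
    have hrn : r.Pairwise (fun u v => u.1 ≠ v.1) := hr.imp (fun h => ne_of_lt h)
    by_cases hs : s < 0
    · obtain ⟨m, rest, r1, r2, hskip, hr12, hpickf, hpermrest, hsortrest, hndrest, hlen2⟩ :=
        pvBStep pvGX r sx removed hpx hsx hnx hr hne
      rw [pvBLoop, if_pos hs, hskip]
      have hmapne : r.map (·.2) ≠ [] := by simpa using hne
      obtain ⟨v, t, hvt⟩ := List.exists_cons_of_ne_nil hmapne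
      rw [hvt, pvSpecLoop, if_pos hs]
      simp only [hpickf v t hvt]
      have hpy' := pvBPassive sy removed m r r1 r2 hpy hr12 hrn
      have hr' : (r1 ++ r2).Pairwise (fun u v => u.1 < v.1) := by
        rw [hr12] at hr
        exact hr.sublist ((List.Sublist.refl r1).append (List.sublist_cons_self m r2))
      have hlen' : (r1 ++ r2).length = k := by omega
      exact ih (r1 ++ r2) rest sy (PySem.Set.add removed m.1) (lef ++ [m.2]) top
        (s + m.2.2) hlen' hr' hpermrest hpy' hsortrest hsy hndrest hny
    · obtain ⟨m, rest, r1, r2, hskip, hr12, hpickf, hpermrest, hsortrest, hndrest, hlen2⟩ :=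
        pvBStep pvGY r sy removed hpy hsy hny hr hne
      rw [pvBLoop, if_neg hs, hskip]
      have hmapne : r.map (·.2) ≠ [] := by simpa using hne
      obtain ⟨v, t, hvt⟩ := List.exists_cons_of_ne_nil hmapne
      rw [hvt, pvSpecLoop, if_neg hs]
      simp only [hpickf v t hvt]
      have hpx' := pvBPassive sx removed m r r1 r2 hpx hr12 hrn
      have hr' : (r1 ++ r2).Pairwise (fun u v => u.1 < v.1) := by
        rw [hr12] at hr
        exact hr.sublist ((List.Sublist.refl r1).append (List.sublist_cons_self m r2))
      have hlen' : (r1 ++ r2).length = k := by omega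
      exact ih (r1 ++ r2) sx rest (PySem.Set.add removed m.1) lef (top ++ [m.2])
        (s - m.2.2) hlen' hr' hpx' hpermrest hsx hsortrest hnx hndrest

-- ===== VERDICT (by name: the statement is the Claim_ definition above) =====
theorem distributeDigitsOverLeftAndTop_spec : Claim_equal_distributeDigitsOverLeftAndTop := by
  intro dig _
  unfold Spec_distributeDigitsOverLeftAndTop
  show distributeDigitsOverLeftAndTop dig = distributeDigitsOverLeftAndTop_alt dig
  unfold distributeDigitsOverLeftAndTop distributeDigitsOverLeftAndTop_alt
  simp only []
  rw [pvALoop_eq_spec dig.length dig rfl]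
  have hfid : ∀ l : List (Int × ((Int × Int) × Int)),
      l.filter (fun e => !PySem.Set.contains PySem.Set.empty e.1) = l := by
    intro l
    apply List.filter_eq_self.mpr
    intro a _
    simp [PySem.Set.contains, PySem.Set.empty]
  have hitems : (PySem.List.enumerate dig 0).Pairwise (fun u v => u.1 < v.1) :=
    PySem.List.pairwise_lt_enumerate dig 0
  have hitemsnd : (PySem.List.enumerate dig 0).Pairwise (fun u v => u.1 ≠ v.1) :=
    hitems.imp (fun h => ne_of_lt h)
  have hpermX : ((PySem.List.sorted2 (PySem.List.enumerate dig 0)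
      (fun e => e.2.1.1) (fun e => e.1)).filter
        (fun e => !PySem.Set.contains PySem.Set.empty e.1)).Perm
      (PySem.List.enumerate dig 0) := by
    rw [hfid]
    exact PySem.List.sorted2_perm _ _ _ false
  have hpermY : ((PySem.List.sorted2 (PySem.List.enumerate dig 0)
      (fun e => e.2.1.2) (fun e => e.1)).filter
        (fun e => !PySem.Set.contains PySem.Set.empty e.1)).Perm
      (PySem.List.enumerate dig 0) := by
    rw [hfid]
    exact PySem.List.sorted2_perm _ _ _ false
  have heqX : PySem.List.sorted2 (PySem.List.enumerate dig 0)
      (fun e => e.2.1.1) (fun e => e.1) =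
      List.foldl (fun acc x => PySem.List.insertBy (pvLex pvGX) x acc) []
        (PySem.List.enumerate dig 0) := pvSorted2_eq _ pvGX
  have heqY : PySem.List.sorted2 (PySem.List.enumerate dig 0)
      (fun e => e.2.1.2) (fun e => e.1) =
      List.foldl (fun acc x => PySem.List.insertBy (pvLex pvGY) x acc) []
        (PySem.List.enumerate dig 0) := pvSorted2_eq _ pvGY
  have hsortX : (PySem.List.sorted2 (PySem.List.enumerate dig 0)
      (fun e => e.2.1.1) (fun e => e.1)).Pairwise (fun u v => pvLex pvGX v u = false) := by
    rw [heqX]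
    exact pvFoldlIns_pairwise _ (pvLex_trans pvGX) (pvLex_asym pvGX) _ [] List.Pairwise.nil
  have hsortY : (PySem.List.sorted2 (PySem.List.enumerate dig 0)
      (fun e => e.2.1.2) (fun e => e.1)).Pairwise (fun u v => pvLex pvGY v u = false) := by
    rw [heqY]
    exact pvFoldlIns_pairwise _ (pvLex_trans pvGY) (pvLex_asym pvGY) _ [] List.Pairwise.nil
  have hndX : (PySem.List.sorted2 (PySem.List.enumerate dig 0)
      (fun e => e.2.1.1) (fun e => e.1)).Pairwise (fun u v => u.1 ≠ v.1) :=
    (List.Perm.pairwise_iff (fun {_ _} h => Ne.symm h) (PySem.List.sorted2_perm _ _ _ false)).mpr hitemsnd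
  have hndY : (PySem.List.sorted2 (PySem.List.enumerate dig 0)
      (fun e => e.2.1.2) (fun e => e.1)).Pairwise (fun u v => u.1 ≠ v.1) :=
    (List.Perm.pairwise_iff (fun {_ _} h => Ne.symm h) (PySem.List.sorted2_perm _ _ _ false)).mpr hitemsnd
  rw [pvBLoop_eq_spec (PySem.List.enumerate dig 0).length (PySem.List.enumerate dig 0)
    _ _ PySem.Set.empty [] [] 0 rfl hitems hpermX hpermY hsortX hsortY hndX hndY]
  rw [PySem.List.map_snd_enumerate, PySem.List.length_enumerate]
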